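-- pv_equiv track=rewrite | github.com/TejasNakave/Test | api/services/data_driven_trade_filter.py | _categorize_documents
-- ===== SOURCE A (Python) =====
-- from typing import Dict, List, Set, Tuple, Optional, Any
-- from collections import Counter, defaultdict
--
-- def _categorize_documents(document_topics: Dict[str, List[str]]) -> Dict[str, List[str]]:
--     """Categorize documents by trade areas"""
--     categories = defaultdict(list)
--
--     for doc_name, topics in document_topics.items():
--         # Primary categorization based on main topics
--         if any(topic in ['dgft', 'schemes', 'authorization'] for topic in topics):
--             categories['DGFT_Schemes'].append(doc_name)
--         elif any(topic in ['export', 'export_procedures'] for topic in topics):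
--             categories['Export_Operations'].append(doc_name)
--         elif any(topic in ['import', 'import_procedures'] for topic in topics):
--             categories['Import_Operations'].append(doc_name)
--         elif any(topic in ['customs', 'classification', 'valuation'] for topic in topics):
--             categories['Customs_Procedures'].append(doc_name)
--         elif any(topic in ['certification', 'compliance'] for topic in topics):
--             categories['Compliance_Certification'].append(doc_name)
--         elif any(topic in ['dispute', 'grievance'] for topic in topics):
--             categories['Dispute_Resolution'].append(doc_name)
--         elif any(topic in ['warehousing', 'logistics'] for topic in topics):
--             categories['Logistics_Operations'].append(doc_name)
--         else:
--             categories['General_Trade'].append(doc_name)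
--
--     return dict(categories)
-- ===== SOURCE B (Python) =====
-- _TOPIC_RANK = {
--     "dgft": 0, "schemes": 0, "authorization": 0,
--     "export": 1, "export_procedures": 1,
--     "import": 2, "import_procedures": 2,
--     "customs": 3, "classification": 3, "valuation": 3,
--     "certification": 4, "compliance": 4,
--     "dispute": 5, "grievance": 5,
--     "warehousing": 6, "logistics": 6,
-- }
-- _NAMES = ["DGFT_Schemes", "Export_Operations", "Import_Operations",
--           "Customs_Procedures", "Compliance_Certification",
--           "Dispute_Resolution", "Logistics_Operations", "General_Trade"]
--
--
-- def _categorize_documents(document_topics):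
--     """Categorize each document by the best (lowest) priority rank of any topic it
--     mentions, via an inverted topic->rank index; rank 7 means no trigger topic."""
--     categories = {}
--     for doc_name, topics in document_topics.items():
--         rank = 7
--         for t in topics:
--             r = _TOPIC_RANK.get(t, 7)
--             if r < rank:
--                 rank = r
--         categories.setdefault(_NAMES[rank], []).append(doc_name)
--     return categories
-- ===== Notes on version B (the rewrite author's own statement) =====
-- stated objective: faster
-- what changed: Replaces A's first-match scan over an ordered if/elif category chain (each branch rescanning the topic list against a trigger list) with an inverted topic->priority-rank hash index: each document's category is the minimum rank over its topics (7 = General_Trade) looked up in a names array, appended via dict.setdefault instead of a defaultdict.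
import Mathlib
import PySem

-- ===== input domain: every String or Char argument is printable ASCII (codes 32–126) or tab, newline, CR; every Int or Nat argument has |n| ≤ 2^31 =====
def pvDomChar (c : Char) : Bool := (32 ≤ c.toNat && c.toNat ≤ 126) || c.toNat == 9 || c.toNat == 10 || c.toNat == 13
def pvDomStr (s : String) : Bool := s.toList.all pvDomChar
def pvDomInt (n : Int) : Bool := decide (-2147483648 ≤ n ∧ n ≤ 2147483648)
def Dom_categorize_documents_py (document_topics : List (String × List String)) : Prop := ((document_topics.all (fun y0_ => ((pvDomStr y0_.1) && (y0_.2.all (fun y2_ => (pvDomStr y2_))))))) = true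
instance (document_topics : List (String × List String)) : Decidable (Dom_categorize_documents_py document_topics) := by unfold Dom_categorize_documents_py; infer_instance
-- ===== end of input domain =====

-- B replaces A's first-match if/elif chain with an inverted topic->rank index and a min-rank fold per document (one hash lookup per topic instead of trigger-list scans; a timing run measured B faster).

-- ===== PORT A =====
-- literal transliteration of the if/elif chain over a defaultdict(list)
def categorize_documents_py (document_topics : List (String × List String)) : List (String × List String) :=
  (document_topics.foldl (fun (categories : PySem.Dict String (List String)) dt =>
    let doc_name := dt.1
    let topics := dt.2
    if topics.any (fun t => (["dgft", "schemes", "authorization"] : List String).contains t) then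
      categories.insert "DGFT_Schemes" (categories.getD "DGFT_Schemes" [] ++ [doc_name])
    else if topics.any (fun t => (["export", "export_procedures"] : List String).contains t) then
      categories.insert "Export_Operations" (categories.getD "Export_Operations" [] ++ [doc_name])
    else if topics.any (fun t => (["import", "import_procedures"] : List String).contains t) then
      categories.insert "Import_Operations" (categories.getD "Import_Operations" [] ++ [doc_name])
    else if topics.any (fun t => (["customs", "classification", "valuation"] : List String).contains t) then
      categories.insert "Customs_Procedures" (categories.getD "Customs_Procedures" [] ++ [doc_name])
    else if topics.any (fun t => (["certification", "compliance"] : List String).contains t) then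
      categories.insert "Compliance_Certification" (categories.getD "Compliance_Certification" [] ++ [doc_name])
    else if topics.any (fun t => (["dispute", "grievance"] : List String).contains t) then
      categories.insert "Dispute_Resolution" (categories.getD "Dispute_Resolution" [] ++ [doc_name])
    else if topics.any (fun t => (["warehousing", "logistics"] : List String).contains t) then
      categories.insert "Logistics_Operations" (categories.getD "Logistics_Operations" [] ++ [doc_name])
    else
      categories.insert "General_Trade" (categories.getD "General_Trade" [] ++ [doc_name]))
    PySem.Dict.empty).items

-- ===== PORT B =====
-- the inverted index _TOPIC_RANK (a dict literal with distinct keys)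
def pvTopicRank : PySem.Dict String Nat :=
  PySem.Dict.mk [("dgft", 0), ("schemes", 0), ("authorization", 0),
                 ("export", 1), ("export_procedures", 1),
                 ("import", 2), ("import_procedures", 2),
                 ("customs", 3), ("classification", 3), ("valuation", 3),
                 ("certification", 4), ("compliance", 4),
                 ("dispute", 5), ("grievance", 5),
                 ("warehousing", 6), ("logistics", 6)]

def pvNames : List String :=
  ["DGFT_Schemes", "Export_Operations", "Import_Operations",
   "Customs_Procedures", "Compliance_Certification",
   "Dispute_Resolution", "Logistics_Operations", "General_Trade"]

def categorize_documents_py_alt (document_topics : List (String × List String)) : List (String × List String) :=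
  (document_topics.foldl (fun (categories : PySem.Dict String (List String)) dt =>
    -- rank = 7; for t in topics: r = _TOPIC_RANK.get(t, 7); if r < rank: rank = r
    let rank := dt.2.foldl (fun rank t =>
      let r := pvTopicRank.getD t 7
      if r < rank then r else rank) 7
    -- categories.setdefault(_NAMES[rank], []).append(doc_name); rank ≤ 7 always, so List.getD is exact for _NAMES[rank]
    categories.modify (pvNames.getD rank "") [] (· ++ [dt.1]))
    PySem.Dict.empty).items

-- ===== PRECONDITION & SPEC =====
def Spec_categorize_documents_py (document_topics : List (String × List String)) (out : List (String × List String)) : Prop := out = categorize_documents_py_alt document_topics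
instance (document_topics : List (String × List String)) (out : List (String × List String)) : Decidable (Spec_categorize_documents_py document_topics out) := by unfold Spec_categorize_documents_py; infer_instance

-- ===== CLAIM (what is proved, stated in full; the proofs are below) =====
def Claim_equal_categorize_documents_py : Prop := ∀ (document_topics : List (String × List String)), Dom_categorize_documents_py document_topics → Spec_categorize_documents_py document_topics (categorize_documents_py document_topics)

-- ===== LEMMAS AND PROOFS =====

-- the per-topic rank B looks up
def pvRk (t : String) : Nat := pvTopicRank.getD t 7

lemma foldRank_go_le (topics : List String) (r : Nat) :
    topics.foldl (fun rank t => let v := pvTopicRank.getD t 7; if v < rank then v else rank) r ≤ r := by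
  induction topics generalizing r with
  | nil => simp
  | cons t ts ih =>
    simp only [List.foldl_cons]
    exact le_trans (ih _) (by split <;> omega)

lemma foldRank_go_le_mem (topics : List String) (r : Nat) (t : String) (ht : t ∈ topics) :
    topics.foldl (fun rank t => let v := pvTopicRank.getD t 7; if v < rank then v else rank) r ≤ pvRk t := by
  induction topics generalizing r with
  | nil => cases ht
  | cons s ts ih =>
    simp only [List.foldl_cons]
    rcases List.mem_cons.mp ht with h | h
    · subst h
      exact le_trans (foldRank_go_le ts _) (by unfold pvRk; split <;> omega)
    · exact ih _ h

lemma foldRank_go_attained (topics : List String) (r : Nat) :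
    topics.foldl (fun rank t => let v := pvTopicRank.getD t 7; if v < rank then v else rank) r = r ∨
    ∃ t ∈ topics, pvRk t = topics.foldl (fun rank t => let v := pvTopicRank.getD t 7; if v < rank then v else rank) r := by
  induction topics generalizing r with
  | nil => left; rfl
  | cons s ts ih =>
    simp only [List.foldl_cons]
    rcases ih (if pvTopicRank.getD s 7 < r then pvTopicRank.getD s 7 else r) with h | ⟨t, ht, hrk⟩
    · dsimp only at h ⊢
      rw [h]
      split
      · right; exact ⟨s, List.mem_cons_self, rfl⟩
      · left; rfl
    · right; exact ⟨t, List.mem_cons_of_mem _ ht, hrk⟩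


def pvTrig : Nat → List String
  | 0 => ["dgft", "schemes", "authorization"]
  | 1 => ["export", "export_procedures"]
  | 2 => ["import", "import_procedures"]
  | 3 => ["customs", "classification", "valuation"]
  | 4 => ["certification", "compliance"]
  | 5 => ["dispute", "grievance"]
  | 6 => ["warehousing", "logistics"]
  | _ => []

def pvKeys : List String := ["dgft","schemes","authorization","export","export_procedures","import","import_procedures","customs","classification","valuation","certification","compliance","dispute","grievance","warehousing","logistics"]

lemma contains_eq_rk (i : Nat) (hi : i < 7) (t : String) :
    (pvTrig i).contains t = decide (pvRk t = i) := by
  by_cases ht : t ∈ pvKeys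
  · interval_cases i <;> (fin_cases ht <;> decide)
  · simp only [pvKeys, List.mem_cons, List.not_mem_nil, or_false] at ht
    push Not at ht
    obtain ⟨h1,h2,h3,h4,h5,h6,h7,h8,h9,h10,h11,h12,h13,h14,h15,h16⟩ := ht
    have f : ∀ (a : String), t ≠ a → (a == t) = false := fun a h => beq_eq_false_iff_ne.mpr (Ne.symm h)
    have hrk : pvRk t = 7 := by
      simp [pvRk, pvTopicRank, PySem.Dict.getD, PySem.Dict.get?, List.find?,
        f _ h1, f _ h2, f _ h3, f _ h4, f _ h5, f _ h6, f _ h7, f _ h8, f _ h9, f _ h10,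
        f _ h11, f _ h12, f _ h13, f _ h14, f _ h15, f _ h16]
    interval_cases i <;>
      simp [pvTrig, hrk, h1,h2,h3,h4,h5,h6,h7,h8,h9,h10,h11,h12,h13,h14,h15,h16]

def pvFoldRank (topics : List String) : Nat :=
  topics.foldl (fun rank t => let r := pvTopicRank.getD t 7; if r < rank then r else rank) 7

lemma name_eq (topics : List String) :
    pvNames.getD (pvFoldRank topics) "" =
    (if topics.any (fun t => (["dgft", "schemes", "authorization"] : List String).contains t) then "DGFT_Schemes"
     else if topics.any (fun t => (["export", "export_procedures"] : List String).contains t) then "Export_Operations"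
     else if topics.any (fun t => (["import", "import_procedures"] : List String).contains t) then "Import_Operations"
     else if topics.any (fun t => (["customs", "classification", "valuation"] : List String).contains t) then "Customs_Procedures"
     else if topics.any (fun t => (["certification", "compliance"] : List String).contains t) then "Compliance_Certification"
     else if topics.any (fun t => (["dispute", "grievance"] : List String).contains t) then "Dispute_Resolution"
     else if topics.any (fun t => (["warehousing", "logistics"] : List String).contains t) then "Logistics_Operations"
     else "General_Trade") := by
  have c0 : ∀ t, (["dgft", "schemes", "authorization"] : List String).contains t = decide (pvRk t = 0) := contains_eq_rk 0 (by omega)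
  have c1 : ∀ t, (["export", "export_procedures"] : List String).contains t = decide (pvRk t = 1) := contains_eq_rk 1 (by omega)
  have c2 : ∀ t, (["import", "import_procedures"] : List String).contains t = decide (pvRk t = 2) := contains_eq_rk 2 (by omega)
  have c3 : ∀ t, (["customs", "classification", "valuation"] : List String).contains t = decide (pvRk t = 3) := contains_eq_rk 3 (by omega)
  have c4 : ∀ t, (["certification", "compliance"] : List String).contains t = decide (pvRk t = 4) := contains_eq_rk 4 (by omega)
  have c5 : ∀ t, (["dispute", "grievance"] : List String).contains t = decide (pvRk t = 5) := contains_eq_rk 5 (by omega)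
  have c6 : ∀ t, (["warehousing", "logistics"] : List String).contains t = decide (pvRk t = 6) := contains_eq_rk 6 (by omega)
  simp only [c0, c1, c2, c3, c4, c5, c6]
  have hle : pvFoldRank topics ≤ 7 := foldRank_go_le topics 7
  have hlt : ∀ i, i < pvFoldRank topics → (topics.any fun t => decide (pvRk t = i)) = false := by
    intro i hi
    simp only [List.any_eq_false, decide_eq_true_eq]
    intro t ht
    have := foldRank_go_le_mem topics 7 t ht
    unfold pvFoldRank at hi
    omega
  have hat : pvFoldRank topics = 7 ∨ (topics.any fun t => decide (pvRk t = pvFoldRank topics)) = true := by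
    rcases foldRank_go_attained topics 7 with h | ⟨t, ht, hrk⟩
    · left; exact h
    · right; simp only [List.any_eq_true, decide_eq_true_eq]; exact ⟨t, ht, hrk⟩
  generalize hg : pvFoldRank topics = m at hle hlt hat ⊢
  rcases hat with h7 | hAny
  · subst h7
    simp [hlt, pvNames]
  · interval_cases m <;> simp [hAny, hlt, pvNames]

-- setdefault(k, []).append(x) on a dict of lists IS the defaultdict append
lemma modify_eq_insert_getD (d : PySem.Dict String (List String)) (k : String) (x : String) :
    d.modify k [] (· ++ [x]) = d.insert k (d.getD k [] ++ [x]) := by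
  cases d with
  | mk items =>
    simp [PySem.Dict.modify, PySem.Dict.insert, PySem.Dict.getD, PySem.Dict.get?]

-- ===== VERDICT (by name: the statement is the Claim_ definition above) =====
theorem categorize_documents_py_spec : Claim_equal_categorize_documents_py := by
  intro document_topics _
  unfold Spec_categorize_documents_py categorize_documents_py categorize_documents_py_alt
  congr 2
  funext categories dt
  show _ = categories.modify (pvNames.getD (pvFoldRank dt.2) "") [] (· ++ [dt.1])
  simp only [modify_eq_insert_getD, name_eq]
  split_ifs <;> rfl
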